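-- pv_equiv track=rewrite | github.com/andreasweberd/2024_Ga | tack_manuel/S.524 Nr.6  Zahlenprodukt.py | produkt
-- ===== SOURCE A (Python) =====
-- def produkt(Endwert):
--     Startwert = 1
--     Produkt = 1
--     while(Startwert <= Endwert):
--         if(Startwert % 5 == 0 and Startwert % 7 == 0):
--             Produkt = Produkt * Startwert
--         Startwert = Startwert + 1
--     if Produkt == 1:
--         return 0
--     else:
--         return Produkt
-- ===== SOURCE B (Python) =====
-- import math
--
-- def produkt(Endwert):
--     # Closed form: the numbers <= Endwert divisible by both 5 and 7 are
--     # 35*1, ..., 35*k with k = Endwert // 35, so their product is 35**k * k!.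
--     k = Endwert // 35
--     if k < 1:
--         return 0
--     return 35 ** k * math.factorial(k)
-- ===== Notes on version B (the rewrite author's own statement) =====
-- stated objective: faster
-- what changed: Replaces the scan of every integer 1..Endwert with the closed form 35**k * k! where k = Endwert//35, since the qualifying numbers are exactly 35*1..35*k.
import Mathlib
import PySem

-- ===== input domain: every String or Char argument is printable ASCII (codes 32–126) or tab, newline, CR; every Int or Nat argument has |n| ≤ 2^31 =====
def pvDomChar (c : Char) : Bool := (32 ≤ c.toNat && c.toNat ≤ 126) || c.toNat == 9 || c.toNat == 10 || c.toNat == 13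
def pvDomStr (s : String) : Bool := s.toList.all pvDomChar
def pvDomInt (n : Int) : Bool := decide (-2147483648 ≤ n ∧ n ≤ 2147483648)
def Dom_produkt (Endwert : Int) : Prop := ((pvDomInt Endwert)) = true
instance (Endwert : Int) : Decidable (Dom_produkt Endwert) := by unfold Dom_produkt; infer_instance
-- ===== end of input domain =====

-- B replaces A's scan of 1..Endwert with the closed form 35^k * k! (k = Endwert // 35): faster.

-- ===== PORT A =====
-- while(Startwert <= Endwert): if % 5 == 0 and % 7 == 0 multiply; Startwert += 1
def produktLoop (Endwert Startwert Produkt : Int) : Int :=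
  if Startwert ≤ Endwert then
    produktLoop Endwert (Startwert + 1)
      (if PySem.Int.mod Startwert 5 = 0 ∧ PySem.Int.mod Startwert 7 = 0
        then Produkt * Startwert else Produkt)
  else Produkt
termination_by (Endwert + 1 - Startwert).toNat
decreasing_by omega

def produkt (Endwert : Int) : Int :=
  let Produkt := produktLoop Endwert 1 1
  if Produkt = 1 then 0 else Produkt

-- ===== PORT B =====
-- k = Endwert // 35; 0 if k < 1 else 35**k * math.factorial(k)
def produkt_alt (Endwert : Int) : Int :=
  let k := PySem.Int.floordiv Endwert 35
  if k < 1 then 0 else (35 : Int) ^ k.toNat * (Nat.factorial k.toNat : Int)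

-- ===== PRECONDITION & SPEC =====
def Spec_produkt (Endwert : Int) (out : Int) : Prop := out = produkt_alt Endwert
instance (Endwert : Int) (out : Int) : Decidable (Spec_produkt Endwert out) := by unfold Spec_produkt; infer_instance

-- ===== CLAIM (what is proved, stated in full; the proofs are below) =====
def Claim_equal_produkt : Prop := ∀ (Endwert : Int), Dom_produkt Endwert → Spec_produkt Endwert (produkt Endwert)

-- ===== LEMMAS AND PROOFS =====

-- one loop step transforms the invariant accumulator 35^(n/35) * (n/35)!
lemma produkt_step (n : Nat) :
    (if PySem.Int.mod ((n : Int) + 1) 5 = 0 ∧ PySem.Int.mod ((n : Int) + 1) 7 = 0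
      then (35 : Int) ^ (n / 35) * (Nat.factorial (n / 35) : Int) * ((n : Int) + 1)
      else (35 : Int) ^ (n / 35) * (Nat.factorial (n / 35) : Int))
    = (35 : Int) ^ ((n + 1) / 35) * (Nat.factorial ((n + 1) / 35) : Int) := by
  have hcond : (PySem.Int.mod ((n : Int) + 1) 5 = 0 ∧ PySem.Int.mod ((n : Int) + 1) 7 = 0)
      ↔ 35 ∣ (n + 1) := by
    rw [PySem.Int.mod_eq_zero_iff_dvd, PySem.Int.mod_eq_zero_iff_dvd]
    constructor
    · rintro ⟨h5, h7⟩
      have h35 : (35 : Int) ∣ ((n : Int) + 1) := by omega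
      exact_mod_cast h35
    · intro h
      have h' : (35 : Int) ∣ ((n : Int) + 1) := by exact_mod_cast h
      omega
  by_cases h : 35 ∣ (n + 1)
  · rw [if_pos (hcond.mpr h)]
    obtain ⟨q, hq⟩ := h
    have hq1 : 1 ≤ q := by omega
    obtain ⟨r, rfl⟩ : ∃ r, q = r + 1 := ⟨q - 1, by omega⟩
    have h1 : n / 35 = r := by omega
    have h2 : (n + 1) / 35 = r + 1 := by omega
    rw [h1, h2, pow_succ, Nat.factorial_succ]
    have : (n : Int) + 1 = 35 * ((r : Int) + 1) := by exact_mod_cast hq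
    rw [this]
    push_cast
    ring
  · rw [if_neg (fun hc => h (hcond.mp hc))]
    have : (n + 1) / 35 = n / 35 := by omega
    rw [this]

-- loop invariant: starting at Startwert = n+1 with accumulator 35^(n/35) * (n/35)!
lemma produktLoop_inv (fuel : Nat) : ∀ (E : Int) (n : Nat), (E - n).toNat = fuel →
    ((n : Int) ≤ E ∨ n = 0) →
    produktLoop E ((n : Int) + 1) ((35 : Int) ^ (n / 35) * (Nat.factorial (n / 35) : Int))
      = (35 : Int) ^ (E.toNat / 35) * (Nat.factorial (E.toNat / 35) : Int) := by
  induction fuel with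
  | zero =>
    intro E n hf hr
    have hstop : ¬ ((n : Int) + 1 ≤ E) := by omega
    rw [produktLoop, if_neg hstop]
    have : E.toNat / 35 = n / 35 := by omega
    rw [this]
  | succ f ih =>
    intro E n hf hr
    have hrun : (n : Int) + 1 ≤ E := by omega
    rw [produktLoop, if_pos hrun, produkt_step]
    have : ((n : Int) + 1) + 1 = ((n + 1 : Nat) : Int) + 1 := by push_cast; ring
    rw [this]
    exact ih E (n + 1) (by omega) (by left; exact_mod_cast hrun)

lemma produktLoop_closed (E : Int) :
    produktLoop E 1 1
      = (35 : Int) ^ (E.toNat / 35) * (Nat.factorial (E.toNat / 35) : Int) := by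
  have := produktLoop_inv (E - 0).toNat E 0 rfl (Or.inr rfl)
  simpa [Nat.factorial] using this

theorem produkt_spec : Claim_equal_produkt := by
  intro E _
  unfold Spec_produkt produkt produkt_alt
  rw [produktLoop_closed]
  rw [PySem.Int.floordiv_eq_ediv_of_pos (by norm_num : (0:Int) < 35)]
  by_cases hE : E < 35
  · have hk : E / 35 < 1 := by omega
    have hK : E.toNat / 35 = 0 := by omega
    rw [if_pos hk, hK]
    norm_num [Nat.factorial]
  · have hk : ¬ (E / 35 < 1) := by omega
    rw [if_neg hk]
    have hEK : (E / 35).toNat = E.toNat / 35 := by omega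
    rw [hEK]
    have hK1 : 1 ≤ E.toNat / 35 := by omega
    have hge : 35 ≤ 35 ^ (E.toNat / 35) * Nat.factorial (E.toNat / 35) := by
      calc 35 = 35 ^ 1 * 1 := by norm_num
        _ ≤ 35 ^ (E.toNat / 35) * Nat.factorial (E.toNat / 35) :=
          Nat.mul_le_mul (Nat.pow_le_pow_right (by norm_num) hK1)
            (Nat.one_le_iff_ne_zero.mpr (Nat.factorial_ne_zero _))
    have hne : (35 : Int) ^ (E.toNat / 35) * (Nat.factorial (E.toNat / 35) : Int) ≠ 1 := by
      have : ((35 ^ (E.toNat / 35) * Nat.factorial (E.toNat / 35) : Nat) : Int) ≠ 1 := by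
        exact_mod_cast Nat.ne_of_gt (by omega)
      simpa [Nat.cast_mul] using this
    rw [if_neg hne]
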